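-- pv_equiv track=rewrite | github.com/rchopinw/coding_exercise | permutations.py | prime_number_multiplication
-- ===== SOURCE A (Python) =====
-- def prime_number_multiplication(nums):
--     results = []
--
--     def backtrack(idx, p):
--         if idx == len(nums):
--             return
--         for i in range(idx, len(nums)):
--             results.append(p)
--             backtrack(i + 1, p * nums[i])
--     backtrack(0, 1)
--     return results
-- ===== SOURCE B (Python) =====
-- def prime_number_multiplication(nums):
--     # Iterative DFS with an explicit stack of (idx, p) frames instead of recursion.
--     results = []
--     n = len(nums)
--     stack = [(0, 1)]
--     while stack:
--         idx, p = stack.pop()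
--         if idx < n:
--             results.append(p)
--             stack.append((idx + 1, p))          # continuation of the loop
--             stack.append((idx + 1, p * nums[idx]))  # child, processed first
--     return results
-- ===== Notes on version B (the rewrite author's own statement) =====
-- stated objective: alternative
-- what changed: Replaced the nested recursive backtracking (closure mutating a shared results list) with an iterative DFS driven by an explicit LIFO stack of (idx, product) frames, pushing the loop continuation before the child so A's preorder is reproduced.
import Mathlib
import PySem

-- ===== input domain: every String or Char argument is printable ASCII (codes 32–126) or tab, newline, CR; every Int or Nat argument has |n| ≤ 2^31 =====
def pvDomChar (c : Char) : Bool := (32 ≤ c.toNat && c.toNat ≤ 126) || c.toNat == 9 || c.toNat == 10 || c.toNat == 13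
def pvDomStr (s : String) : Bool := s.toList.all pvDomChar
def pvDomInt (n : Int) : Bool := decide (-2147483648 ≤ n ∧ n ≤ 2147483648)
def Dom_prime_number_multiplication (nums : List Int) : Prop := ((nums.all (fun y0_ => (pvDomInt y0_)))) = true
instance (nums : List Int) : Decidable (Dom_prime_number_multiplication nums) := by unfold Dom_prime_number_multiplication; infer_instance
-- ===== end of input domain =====

-- B replaces A's recursive backtracking with an explicit-stack iterative DFS (same cost, different decomposition).

-- ===== PORT A =====
-- A's `backtrack` (the `if idx == len: return` guard plus the `for i in range(idx, len)` loop)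
-- as a mutual pair: `pvBtA` is the function body, `pvLoopA` is the for-loop, `res` threads the
-- mutated `results` list.
mutual
def pvBtA (nums : List Int) (idx : Nat) (p : Int) (res : List Int) : List Int :=
  if idx = nums.length then res
  else pvLoopA nums idx p res
termination_by 2 * (nums.length - idx) + 1
decreasing_by omega

def pvLoopA (nums : List Int) (i : Nat) (p : Int) (res : List Int) : List Int :=
  if _h : i < nums.length then
    pvLoopA nums (i + 1) p (pvBtA nums (i + 1) (p * nums.getD i 0) (res ++ [p]))
  else res
termination_by 2 * (nums.length - i)
decreasing_by all_goals omega
end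

def prime_number_multiplication (nums : List Int) : List Int :=
  pvBtA nums 0 1 []

-- ===== PORT B =====
-- B's while-loop over the explicit stack; the head of the list is the top of the stack
-- (so `stack.pop()` is the head, and the child frame pushed last comes first).
def pvRunB (nums : List Int) (stack : List (Nat × Int)) (res : List Int) : List Int :=
  match stack with
  | [] => res
  | (idx, p) :: rest =>
    if _h : idx < nums.length then
      pvRunB nums ((idx + 1, p * nums.getD idx 0) :: (idx + 1, p) :: rest) (res ++ [p])
    else pvRunB nums rest res
termination_by (stack.map (fun f => 3 ^ (nums.length - f.1))).sum
decreasing_by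
  · simp only [List.map_cons, List.sum_cons]
    have h3 : 3 ^ (nums.length - idx) ≥ 3 * 3 ^ (nums.length - (idx + 1)) := by
      have : nums.length - idx = (nums.length - (idx + 1)) + 1 := by omega
      rw [this, pow_succ]; omega
    have h4 : 0 < 3 ^ (nums.length - (idx + 1)) := Nat.pow_pos (by omega)
    omega
  · simp only [List.map_cons, List.sum_cons]
    have : 0 < 3 ^ (nums.length - idx) := Nat.pow_pos (by omega)
    omega

def prime_number_multiplication_alt (nums : List Int) : List Int :=
  pvRunB nums [(0, 1)] []

-- ===== PRECONDITION & SPEC =====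
def Spec_prime_number_multiplication (nums : List Int) (out : List Int) : Prop := out = prime_number_multiplication_alt nums
instance (nums : List Int) (out : List Int) : Decidable (Spec_prime_number_multiplication nums out) := by unfold Spec_prime_number_multiplication; infer_instance

-- ===== CLAIM (what is proved, stated in full; the proofs are below) =====
def Claim_equal_prime_number_multiplication : Prop := ∀ (nums : List Int), Dom_prime_number_multiplication nums → Spec_prime_number_multiplication nums (prime_number_multiplication nums)

-- ===== LEMMAS AND PROOFS =====

-- For in-range indices, the function body agrees with the loop (at idx = length both return res).
theorem pvBtA_eq_loop (nums : List Int) (i : Nat) (p : Int) (res : List Int)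
    (h : i ≤ nums.length) : pvBtA nums i p res = pvLoopA nums i p res := by
  rw [pvBtA]
  by_cases he : i = nums.length
  · subst he
    rw [pvLoopA]
    simp
  · simp [he]

-- Running B's stack machine processes the frames in order, each frame acting like A's backtrack.
theorem pvRunB_eq_foldl (nums : List Int) (stack : List (Nat × Int)) (res : List Int)
    (hst : ∀ f ∈ stack, f.1 ≤ nums.length) :
    pvRunB nums stack res = stack.foldl (fun r f => pvBtA nums f.1 f.2 r) res := by
  induction stack, res using pvRunB.induct nums with
  | case1 res => simp [pvRunB]
  | case2 res idx p rest h ih =>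
    have hrest : ∀ f ∈ (idx + 1, p * nums.getD idx 0) :: (idx + 1, p) :: rest, f.1 ≤ nums.length := by
      intro f hf
      simp only [List.mem_cons] at hf
      rcases hf with rfl | rfl | hf
      · simpa using h
      · simpa using h
      · exact hst f (List.mem_cons_of_mem _ hf)
    rw [pvRunB]
    simp only [h, dif_pos]
    rw [ih hrest]
    simp only [List.foldl_cons]
    congr 1
    -- unroll one step of A's backtrack at idx < length
    rw [pvBtA_eq_loop nums idx p res (Nat.le_of_lt h), pvLoopA]
    simp only [h, dif_pos]
    rw [pvBtA_eq_loop nums (idx + 1) p _ (by omega)]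
  | case3 res idx p rest h ih =>
    have hidx : idx = nums.length := Nat.le_antisymm (hst (idx, p) (List.mem_cons_self)) (Nat.le_of_not_lt h)
    rw [pvRunB]
    simp only [h, dif_neg, not_false_iff]
    rw [ih (fun f hf => hst f (List.mem_cons_of_mem _ hf))]
    simp [List.foldl_cons, pvBtA, hidx]

-- ===== VERDICT (by name: the statement is the Claim_ definition above) =====
theorem prime_number_multiplication_spec : Claim_equal_prime_number_multiplication := by
  intro nums _
  unfold Spec_prime_number_multiplication prime_number_multiplication prime_number_multiplication_alt
  rw [pvRunB_eq_foldl nums [(0, 1)] [] (by simp)]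
  simp [List.foldl_cons]
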